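-- pv_equiv track=rewrite | github.com/miliar/Code_Jam_Webscraper | solutions_python/solutions_year13_round4_nr2/69.py | calc
-- ===== SOURCE A (Python) =====
-- def calc(N, P):
-- 	m = 2**N
-- 	if P == m:
-- 		return m
-- 	if P >= m//2:
-- 		return m - 1
-- 	else:
-- 		return 2 * calc(N - 1, P) - 1
-- ===== SOURCE B (Python) =====
-- def calc(N, P):
--     m = 2 ** N
--     if P == m:
--         return m
--     k = 0
--     while P < m // 2:
--         m //= 2
--         k += 1
--     return (m - 1) * 2 ** k - (2 ** k - 1)
-- ===== Notes on version B (the rewrite author's own statement) =====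
-- stated objective: alternative
-- what changed: Replaces A's binary recursion with an iterative loop that halves m while counting descent steps k, then returns the accumulated closed form (m-1)*2**k - (2**k-1) instead of unwinding a call stack.
-- outside the precondition, e.g. on calc(-1, 0): A returns -0.5, B returns -0.5
import Mathlib
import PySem

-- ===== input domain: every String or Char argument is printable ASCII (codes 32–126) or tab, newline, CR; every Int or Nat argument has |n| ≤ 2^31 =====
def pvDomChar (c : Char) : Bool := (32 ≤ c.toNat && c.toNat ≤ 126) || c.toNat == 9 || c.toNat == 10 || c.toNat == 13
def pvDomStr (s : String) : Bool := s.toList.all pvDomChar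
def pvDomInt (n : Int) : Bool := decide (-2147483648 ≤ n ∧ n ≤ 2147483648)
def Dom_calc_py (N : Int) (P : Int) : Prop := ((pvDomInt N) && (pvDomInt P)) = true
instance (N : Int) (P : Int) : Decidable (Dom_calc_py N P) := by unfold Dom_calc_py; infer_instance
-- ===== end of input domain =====

-- B replaces A's binary recursion by an iterative halving loop with a step counter
-- and one closed-form combination at the end (objective: alternative decomposition).

-- ===== PORT A =====
-- Literal port of A's recursion; recursion on N.toNat.  The 'if 0 < N' guard only makes the
-- recursion total in Lean: on Pre_ (N ≥ 0, P ≥ 0) the else-of-the-guard is never reached.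
def calc_py (N : Int) (P : Int) : Int :=
  let m : Int := 2 ^ N.toNat
  if P = m then m
  else if PySem.Int.floordiv m 2 ≤ P then m - 1
  else if h : 0 < N then 2 * calc_py (N - 1) P - 1 else 0
termination_by N.toNat
decreasing_by omega

-- ===== PORT B =====
-- the while loop of Source B; the '0 < m' guard only makes it total (on Pre_ m stays positive)
def calcLoop (m : Int) (P : Int) (k : Nat) : Int × Nat :=
  if h : P < PySem.Int.floordiv m 2 ∧ 0 < m then
    calcLoop (PySem.Int.floordiv m 2) P (k + 1)
  else (m, k)
termination_by m.toNat
decreasing_by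
  have h2 : PySem.Int.floordiv m 2 = m / 2 := PySem.Int.floordiv_eq_ediv_of_pos (by omega)
  omega

def calc_py_alt (N : Int) (P : Int) : Int :=
  let m : Int := 2 ^ N.toNat
  if P = m then m
  else
    let r := calcLoop m P 0
    (r.1 - 1) * 2 ^ r.2 - (2 ^ r.2 - 1)

-- ===== PRECONDITION & SPEC =====
-- Pre_ excludes N < 0 (2**N is a float, so A returns a non-int) and P < 0 (A recurses forever,
-- RecursionError).
def Pre_calc_py (N : Int) (P : Int) : Prop := 0 ≤ N ∧ 0 ≤ P
instance (N : Int) (P : Int) : Decidable (Pre_calc_py N P) := by unfold Pre_calc_py; infer_instance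
def pvWitness_calc_py : Int × Int := (3, 2)

def Spec_calc_py (N : Int) (P : Int) (out : Int) : Prop := out = calc_py_alt N P
instance (N : Int) (P : Int) (out : Int) : Decidable (Spec_calc_py N P out) := by unfold Spec_calc_py; infer_instance

-- ===== CLAIM (what is proved, stated in full; the proofs are below) =====
def Claim_equal_calc_py : Prop := ∀ (N : Int) (P : Int), Dom_calc_py N P → Pre_calc_py N P → Spec_calc_py N P (calc_py N P)

-- ===== LEMMAS AND PROOFS =====

theorem calcLoop_k_shift (m P : Int) (k : Nat) :
    calcLoop m P k = ((calcLoop m P 0).1, k + (calcLoop m P 0).2) := by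
  by_cases h : P < PySem.Int.floordiv m 2 ∧ 0 < m
  · have h2 : PySem.Int.floordiv m 2 = m / 2 := PySem.Int.floordiv_eq_ediv_of_pos (by omega)
    have hlt : (PySem.Int.floordiv m 2).toNat < m.toNat := by omega
    rw [calcLoop, dif_pos h, calcLoop_k_shift (PySem.Int.floordiv m 2) P (k + 1)]
    conv_rhs => rw [calcLoop, dif_pos h, calcLoop_k_shift (PySem.Int.floordiv m 2) P 1]
    simp [Nat.add_comm, Nat.add_left_comm]
  · rw [calcLoop, dif_neg h]
    conv_rhs => rw [calcLoop, dif_neg h]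
    simp
termination_by m.toNat

-- g m P := value B builds from the loop started at m
theorem calcLoop_step (m P : Int) (h : P < PySem.Int.floordiv m 2) (hm : 0 < m) :
    ((calcLoop m P 0).1 - 1) * 2 ^ (calcLoop m P 0).2 - (2 ^ (calcLoop m P 0).2 - 1)
      = 2 * (((calcLoop (PySem.Int.floordiv m 2) P 0).1 - 1) * 2 ^ (calcLoop (PySem.Int.floordiv m 2) P 0).2 - (2 ^ (calcLoop (PySem.Int.floordiv m 2) P 0).2 - 1)) - 1 := by
  rw [calcLoop, dif_pos ⟨h, hm⟩, calcLoop_k_shift (PySem.Int.floordiv m 2) P 1]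
  simp only [pow_succ, pow_add]
  ring

theorem calcLoop_stop (m P : Int) (h : ¬ (P < PySem.Int.floordiv m 2 ∧ 0 < m)) :
    calcLoop m P 0 = (m, 0) := by
  rw [calcLoop, dif_neg h]

theorem calc_main (n : Nat) (P : Int) (hP : 0 ≤ P) :
    calc_py (n : Int) P = calc_py_alt (n : Int) P := by
  induction n with
  | zero =>
    rw [calc_py, calc_py_alt]
    simp only [Nat.cast_zero, Int.toNat_zero, pow_zero]
    have hfd : PySem.Int.floordiv (1:Int) 2 = 0 := by decide
    by_cases hpm : P = 1
    · simp [hpm]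
    · rw [calcLoop_stop _ _ (by rw [hfd]; omega)]
      simp [hpm, hP]
  | succ k ih =>
    have htn : Int.toNat (k + 1 : Nat) = k + 1 := by omega
    have hfd : PySem.Int.floordiv ((2:Int) ^ (k + 1)) 2 = 2 ^ k := by
      rw [PySem.Int.floordiv_eq_ediv_of_pos (by omega)]
      rw [pow_succ, Int.mul_ediv_cancel _ (by omega)]
    rw [calc_py, calc_py_alt]
    simp only [htn]
    by_cases hpm : P = 2 ^ (k + 1)
    · simp [hpm]
    · simp only [if_neg hpm]
      by_cases hge : PySem.Int.floordiv ((2:Int) ^ (k + 1)) 2 ≤ P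
      · rw [calcLoop_stop _ _ (by omega), if_pos hge]
        norm_num
      · have hlt : P < PySem.Int.floordiv ((2:Int) ^ (k + 1)) 2 := by omega
        have hpos : (0:Int) < 2 ^ (k + 1) := by positivity
        rw [if_neg hge, dif_pos (by exact_mod_cast Nat.cast_pos.mpr (Nat.succ_pos k) : (0:Int) < (k+1:Nat))]
        have hsub : ((k + 1 : Nat) : Int) - 1 = (k : Nat) := by push_cast; ring
        rw [hsub, ih]
        rw [calcLoop_step _ _ hlt hpos, hfd]
        rw [calc_py_alt]
        have hktn : Int.toNat (k : Nat) = k := by omega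
        have hpne : P ≠ 2 ^ k := by
          have : P < 2 ^ k := by omega
          omega
        simp only [hktn, if_neg hpne]

theorem calc_py_spec : Claim_equal_calc_py := by
  intro N P _ hpre
  obtain ⟨hN, hP⟩ := hpre
  have : ∃ n : Nat, N = (n : Int) := ⟨N.toNat, by omega⟩
  obtain ⟨n, rfl⟩ := this
  exact calc_main n P hP
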